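-- pv_equiv track=rewrite | github.com/burakaslantas/YeditepeCS | CSE101 HomeWorks/HW#2_B-Aslantas/HW#2_B-Aslantas.py | s_num
-- ===== SOURCE A (Python) =====
-- def s_num(i):
--     star_num = 9
--     c_line= str()
--     for j in range(1, i-1, 2):
--         star_num += j
--     for k in range(i):
--         star_num += 1
--         c_line += str(star_num) + " "
--     return c_line
-- ===== SOURCE B (Python) =====
-- def s_num(i):
--     base = 9 + max(0, (i - 1) // 2) ** 2
--     return "".join(str(x) + " " for x in range(base + 1, base + i + 1))
-- ===== Notes on version B (the rewrite author's own statement) =====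
-- stated objective: simpler
-- what changed: The odd-number accumulation loop is replaced by a closed-form square for the starting value, and the output is built as one join over the consecutive integer range instead of a stateful loop mutating a counter and a string.
import Mathlib
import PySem

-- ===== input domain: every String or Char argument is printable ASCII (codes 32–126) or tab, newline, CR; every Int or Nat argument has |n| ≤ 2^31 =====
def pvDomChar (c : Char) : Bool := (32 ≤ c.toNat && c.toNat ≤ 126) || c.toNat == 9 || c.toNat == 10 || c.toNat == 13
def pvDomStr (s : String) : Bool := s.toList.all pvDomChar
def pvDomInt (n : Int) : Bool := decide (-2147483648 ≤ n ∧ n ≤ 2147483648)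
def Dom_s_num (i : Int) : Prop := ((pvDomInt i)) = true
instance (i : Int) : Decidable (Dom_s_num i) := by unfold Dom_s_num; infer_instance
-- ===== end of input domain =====

-- B replaces A's first accumulation loop by the closed form 9 + max(0,(i-1)//2)^2 and
-- builds the string by joining over the consecutive range directly (objective: simpler).

-- ===== PORT A =====
def s_num (i : Int) : String :=
  let star_num : Int := (PySem.List.pyRange 1 (i - 1) 2).foldl (fun s j => s + j) 9
  let p : Int × List Char :=
    (PySem.List.pyRange 0 i 1).foldl
      (fun (st : Int × List Char) _ =>
        (st.1 + 1, st.2 ++ PySem.Int.toChars (st.1 + 1) ++ [' ']))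
      (star_num, [])
  String.ofList p.2

-- ===== PORT B =====
def s_num_alt (i : Int) : String :=
  let base : Int := 9 + (max 0 (PySem.Int.floordiv (i - 1) 2)) ^ 2
  String.ofList
    (((PySem.List.pyRange (base + 1) (base + i + 1) 1).map
        (fun x => PySem.Int.toChars x ++ [' '])).flatten)

-- ===== PRECONDITION & SPEC =====
def Spec_s_num (i : Int) (out : String) : Prop := out = s_num_alt i
instance (i : Int) (out : String) : Decidable (Spec_s_num i out) := by unfold Spec_s_num; infer_instance

-- ===== CLAIM (what is proved, stated in full; the proofs are below) =====
def Claim_equal_s_num : Prop := ∀ (i : Int), Dom_s_num i → Spec_s_num i (s_num i)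

-- ===== LEMMAS AND PROOFS =====

-- sum of the odd numbers 1,3,…  (A's first loop) is a perfect square
lemma odd_sum (n : Nat) :
    (List.map (fun k : Nat => (1 : Int) + 2 * (k : Int)) (List.range n)).sum = (n : Int) ^ 2 := by
  induction n with
  | zero => simp
  | succ n ih =>
      rw [List.range_succ, List.map_append, List.sum_append, ih]
      push_cast
      simp
      ring

-- A's second loop, characterised: it appends the decimal forms of the next l.length integers
lemma loop_eq (l : List Int) (b : Int) (cs : List Char) :
    l.foldl (fun (st : Int × List Char) _ =>
        (st.1 + 1, st.2 ++ PySem.Int.toChars (st.1 + 1) ++ [' '])) (b, cs)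
    = (b + l.length,
       cs ++ (((PySem.List.pyRange (b + 1) (b + 1 + l.length) 1).map
          (fun x => PySem.Int.toChars x ++ [' '])).flatten)) := by
  induction l generalizing b cs with
  | nil =>
      simp [PySem.List.pyRange_one_eq_nil (le_refl (b + 1 : Int))]
  | cons x l ih =>
      simp only [List.foldl_cons, ih (b + 1), List.length_cons, Prod.mk.injEq]
      push_cast
      refine ⟨by ring, ?_⟩
      rw [show b + 1 + ((l.length : Int) + 1) = b + 1 + 1 + (l.length : Int) from by ring]
      rw [PySem.List.pyRange_one_cons (show (b:Int) + 1 < b + 1 + 1 + (l.length:Int) by omega)]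
      simp

-- A's first loop equals B's closed form
lemma base_eq (i : Int) :
    (PySem.List.pyRange 1 (i - 1) 2).foldl (fun s j => s + j) 9
    = 9 + (max 0 (PySem.Int.floordiv (i - 1) 2)) ^ 2 := by
  have hfold : (PySem.List.pyRange 1 (i - 1) 2).foldl (fun s j => s + j) 9
      = 9 + (PySem.List.pyRange 1 (i - 1) 2).sum := by
    simpa using PySem.List.foldl_add (PySem.List.pyRange 1 (i - 1) 2) (fun j => j) 9
  rw [hfold, PySem.List.pyRange_of_pos 1 (i - 1) (by norm_num)]
  by_cases hi : (1 : Int) < i - 1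
  · have hm : max 0 (PySem.Int.floordiv (i - 1) 2) = PySem.Int.floordiv (i - 1) 2 := by
      have := PySem.Int.le_floordiv_iff_mul_le (a := i - 1) (b := 2) (q := 0) (by norm_num)
      omega
    have hd : PySem.Int.floordiv (i - 1) 2 = (i - 1 - 1 + 2 - 1) / 2 := by
      rw [PySem.Int.floordiv_eq_ediv_of_pos (by norm_num)]
      omega
    rw [if_pos hi, hm, hd]
    rw [odd_sum, Int.toNat_of_nonneg (by omega)]
  · have hm : max 0 (PySem.Int.floordiv (i - 1) 2) = 0 := by
      have := PySem.Int.floordiv_lt_iff_lt_mul (a := i - 1) (b := 2) (q := 1) (by norm_num)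
      omega
    rw [if_neg hi, hm]
    simp

-- ===== VERDICT (by name: the statement is the Claim_ definition above) =====
theorem s_num_spec : Claim_equal_s_num := by
  intro i _
  show s_num i = s_num_alt i
  simp only [s_num, s_num_alt]
  rw [base_eq i, loop_eq, PySem.List.length_pyRange_one]
  set B : Int := 9 + (max 0 (PySem.Int.floordiv (i - 1) 2)) ^ 2 with hB
  by_cases hi : 0 ≤ i
  · have : B + 1 + (((i - 0).toNat : Nat) : Int) = B + i + 1 := by omega
    rw [this]
    simp
  · rw [PySem.List.pyRange_one_eq_nil (by omega : B + 1 + (((i - 0).toNat : Nat):Int) ≤ B + 1),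
        PySem.List.pyRange_one_eq_nil (by omega : B + i + 1 ≤ B + 1)]
    simp
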